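-- pv_equiv track=rewrite | github.com/arktos-ai-lab/felix-cat-original | companion-tools/analyzeassist/tmx.py | unescape_text
-- ===== SOURCE A (Python) =====
-- def unescape_text(text):
--     """Replace escaped XML entities in text
--
--     >>> unescape_text(u"&lt;spam&gt;")
--     u'<spam>'
--
--     """
--
--     # XML char entities
--     charmap = ((u"&apos;", u"'"),
--                (u"&quot;", u'"'),
--                (u"&lt;", u"<"),
--                (u"&gt;", u">"),
--                (u"&amp;", "&"))
--
--     for char, replacement in charmap:
--         text = text.replace(char, replacement)
--
--     return text
-- ===== SOURCE B (Python) =====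
-- _ENTITIES = (("&apos;", "'"), ("&quot;", '"'), ("&lt;", "<"), ("&gt;", ">"), ("&amp;", "&"))
--
-- def unescape_text(text):
--     out = []
--     i = 0
--     n = len(text)
--     while i < n:
--         c = text[i]
--         if c == '&':
--             for ent, rep in _ENTITIES:
--                 if text.startswith(ent, i):
--                     out.append(rep)
--                     i += len(ent)
--                     break
--             else:
--                 out.append(c)
--                 i += 1
--         else:
--             out.append(c)
--             i += 1
--     return ''.join(out)
-- ===== Notes on version B (the rewrite author's own statement) =====
-- stated objective: alternative
-- what changed: A runs five sequential full-string str.replace passes, one per XML entity; B makes a single left-to-right scan that decodes whichever of the five entities starts at the current position (trying them in A's order), which is equivalent because every entity begins with an ampersand and no replacement character except the last pass's ampersand can begin an entity.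
import Mathlib
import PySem

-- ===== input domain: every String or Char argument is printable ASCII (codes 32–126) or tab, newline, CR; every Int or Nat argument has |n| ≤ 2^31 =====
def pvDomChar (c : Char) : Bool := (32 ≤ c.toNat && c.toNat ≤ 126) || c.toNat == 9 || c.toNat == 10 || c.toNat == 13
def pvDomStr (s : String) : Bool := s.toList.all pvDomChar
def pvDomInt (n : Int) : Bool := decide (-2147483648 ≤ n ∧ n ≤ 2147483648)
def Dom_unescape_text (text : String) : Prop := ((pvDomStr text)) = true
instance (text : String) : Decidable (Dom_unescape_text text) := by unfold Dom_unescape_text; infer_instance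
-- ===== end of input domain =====

-- B replaces A's five sequential full-string replace passes by ONE left-to-right scan that
-- decodes each entity at its position (a different algorithm of similar cost; objective: alternative).

-- ===== PORT A =====
-- A: loop over the five (entity, replacement) pairs, each a full str.replace pass.
def unescape_text (text : String) : String :=
  let charmap : List (String × String) :=
    [("&apos;", "'"), ("&quot;", "\""), ("&lt;", "<"), ("&gt;", ">"), ("&amp;", "&")]
  charmap.foldl (fun t p => PySem.Str.replace t p.1 p.2) text

-- ===== PORT B =====
-- B: one pass over the characters; at each '&' try the five entities in order (text.startswith(ent, i)).
def unescape_text_scan : List Char → List Char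
  | [] => []
  | c :: t =>
    if c = '&' then
      if ['a','p','o','s',';'].isPrefixOf t then '\'' :: unescape_text_scan (t.drop 5)
      else if ['q','u','o','t',';'].isPrefixOf t then '"' :: unescape_text_scan (t.drop 5)
      else if ['l','t',';'].isPrefixOf t then '<' :: unescape_text_scan (t.drop 3)
      else if ['g','t',';'].isPrefixOf t then '>' :: unescape_text_scan (t.drop 3)
      else if ['a','m','p',';'].isPrefixOf t then '&' :: unescape_text_scan (t.drop 4)
      else c :: unescape_text_scan t
    else c :: unescape_text_scan t
termination_by l => l.length
decreasing_by all_goals simp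

def unescape_text_alt (text : String) : String :=
  String.ofList (unescape_text_scan text.toList)

-- ===== PRECONDITION & SPEC =====
def Spec_unescape_text (text : String) (out : String) : Prop := out = unescape_text_alt text
instance (text : String) (out : String) : Decidable (Spec_unescape_text text out) := by unfold Spec_unescape_text; infer_instance

-- ===== CLAIM (what is proved, stated in full; the proofs are below) =====
def Claim_equal_unescape_text : Prop := ∀ (text : String), Dom_unescape_text text → Spec_unescape_text text (unescape_text text)

-- ===== LEMMAS AND PROOFS =====

-- Leftmost-first replace as a structural recursion on the string (equals PySem.Chars.replace for nonempty pattern).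
def repl (old new : List Char) : List Char → List Char
  | [] => []
  | c :: t =>
    if old.isPrefixOf (c :: t) then new ++ repl old new (t.drop (old.length - 1))
    else c :: repl old new t
termination_by l => l.length
decreasing_by all_goals simp

lemma go_eq_repl (old new : List Char) (hold : old ≠ []) :
    ∀ (fuel : Nat) (l acc : List Char), l.length ≤ fuel →
      PySem.Chars.replace.go old new fuel l acc = acc.reverse ++ repl old new l := by
  intro fuel
  induction fuel with
  | zero =>
    intro l acc hl
    have : l = [] := List.eq_nil_of_length_eq_zero (Nat.le_zero.mp hl)
    subst this
    simp [PySem.Chars.replace.go.eq_def, repl]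
  | succ fuel ih =>
    intro l acc hl
    match l with
    | [] => rw [PySem.Chars.replace.go.eq_def, repl]; simp
    | c :: t =>
      rw [PySem.Chars.replace.go.eq_def]
      by_cases h : old.isPrefixOf (c :: t) = true
      · simp only [h, if_pos]
        have hlen : 1 ≤ old.length := by
          cases old with
          | nil => exact absurd rfl hold
          | cons a as => simp
        have hdrop : List.drop old.length (c :: t) = t.drop (old.length - 1) := by
          cases old with
          | nil => exact absurd rfl hold
          | cons b bs => simp
        have hl' : t.length + 1 ≤ fuel + 1 := by simpa using hl
        rw [ih (List.drop old.length (c :: t)) (new.reverse ++ acc)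
              (by simp; omega)]
        rw [repl]
        simp [h, hdrop]
      · simp only [h, if_neg, Bool.not_eq_true]
        rw [ih t (c :: acc) (by simpa using Nat.le_of_succ_le_succ hl)]
        rw [repl]
        simp [h]

lemma replace_eq_repl (s old new : List Char) (hold : old ≠ []) :
    PySem.Chars.replace s old new = repl old new s := by
  rw [PySem.Chars.replace]
  simp [List.isEmpty_iff, hold, go_eq_repl old new hold s.length s [] (le_refl _)]

lemma repl_cons_neg {old : List Char} (new : List Char) {c : Char} {s : List Char}
    (h : old.isPrefixOf (c :: s) = false) :
    repl old new (c :: s) = c :: repl old new s := by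
  rw [repl]; simp [h]

lemma repl_cons_ne {old : List Char} (new : List Char) {a c : Char} {s : List Char}
    (h : old.head? = some a) (hc : c ≠ a) :
    repl old new (c :: s) = c :: repl old new s := by
  apply repl_cons_neg
  cases old with
  | nil => simp at h
  | cons b bs =>
    simp at h
    subst h
    simp [List.isPrefixOf]
    intro hbc
    exact absurd hbc.symm hc

-- prefix-reflection: replacing an '&'-headed pattern by a single char d cannot create or destroy
-- a prefix that contains neither '&' nor d
lemma prefix_repl_iff (q : List Char) (d : Char) (hq : q.head? = some '&') :
    ∀ (s pat : List Char), '&' ∉ pat → d ∉ pat →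
      pat.isPrefixOf (repl q [d] s) = pat.isPrefixOf s := by
  suffices H : ∀ (n : Nat) (s pat : List Char), s.length ≤ n → '&' ∉ pat → d ∉ pat →
      pat.isPrefixOf (repl q [d] s) = pat.isPrefixOf s by
    intro s pat h1 h2; exact H s.length s pat le_rfl h1 h2
  intro n
  induction n with
  | zero =>
    intro s pat hs _ _
    have : s = [] := List.eq_nil_of_length_eq_zero (Nat.le_zero.mp hs)
    subst this; rw [repl]
  | succ n ih =>
    intro s pat hs hamp hd
    match s with
    | [] => rw [repl]
    | c :: t =>
      have ht : t.length ≤ n := by simpa using hs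
      by_cases hm : q.isPrefixOf (c :: t) = true
      · have hc : c = '&' := by
          cases q with
          | nil => simp at hq
          | cons b bs =>
            simp at hq; subst hq
            simp [List.isPrefixOf] at hm
            exact hm.1.symm
        rw [repl]
        simp only [hm, if_pos]
        cases pat with
        | nil => simp
        | cons p pr =>
          have hp1 : p ≠ d := fun h => hd (h ▸ List.mem_cons_self ..)
          have hp2 : p ≠ '&' := fun h => hamp (h ▸ List.mem_cons_self ..)
          simp [List.isPrefixOf, hc, beq_eq_false_iff_ne.mpr hp1, beq_eq_false_iff_ne.mpr hp2]
      · rw [repl]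
        simp only [hm, if_neg, Bool.not_eq_true]
        cases pat with
        | nil => simp
        | cons p pr =>
          have hpr1 : '&' ∉ pr := fun h => hamp (List.mem_cons_of_mem _ h)
          have hpr2 : d ∉ pr := fun h => hd (List.mem_cons_of_mem _ h)
          simp [List.isPrefixOf, ih t pr ht hpr1 hpr2]

lemma master : ∀ cs : List Char,
    repl "&amp;".toList ['&'] (repl "&gt;".toList ['>'] (repl "&lt;".toList ['<']
      (repl "&quot;".toList ['"'] (repl "&apos;".toList ['\''] cs)))) = unescape_text_scan cs := by
  suffices H : ∀ (n : Nat) (cs : List Char), cs.length ≤ n →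
      repl "&amp;".toList ['&'] (repl "&gt;".toList ['>'] (repl "&lt;".toList ['<']
        (repl "&quot;".toList ['"'] (repl "&apos;".toList ['\''] cs)))) = unescape_text_scan cs by
    intro cs; exact H cs.length cs le_rfl
  intro n
  induction n with
  | zero =>
    intro cs hcs
    have : cs = [] := List.eq_nil_of_length_eq_zero (Nat.le_zero.mp hcs)
    subst this
    simp [repl, unescape_text_scan]
  | succ n ih =>
    intro cs hcs
    match cs with
    | [] => simp [repl, unescape_text_scan]
    | c :: t =>
      have ht : t.length ≤ n := by simpa using hcs
      by_cases hc : c = '&'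
      · subst hc
        by_cases h1 : (['a','p','o','s',';'] : List Char).isPrefixOf t = true
        · obtain ⟨t', rfl⟩ := List.isPrefixOf_iff_prefix.mp h1
          have ht' : t'.length ≤ n := by simp at ht; omega
          simp [repl, unescape_text_scan]
          simpa using ih t' ht'
        · rw [Bool.not_eq_true] at h1
          by_cases h2 : (['q','u','o','t',';'] : List Char).isPrefixOf t = true
          · obtain ⟨t', rfl⟩ := List.isPrefixOf_iff_prefix.mp h2
            have ht' : t'.length ≤ n := by simp at ht; omega
            simp [repl, unescape_text_scan]
            simpa using ih t' ht'
          · rw [Bool.not_eq_true] at h2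
            by_cases h3 : (['l','t',';'] : List Char).isPrefixOf t = true
            · obtain ⟨t', rfl⟩ := List.isPrefixOf_iff_prefix.mp h3
              have ht' : t'.length ≤ n := by simp at ht; omega
              simp [repl, unescape_text_scan]
              simpa using ih t' ht'
            · rw [Bool.not_eq_true] at h3
              by_cases h4 : (['g','t',';'] : List Char).isPrefixOf t = true
              · obtain ⟨t', rfl⟩ := List.isPrefixOf_iff_prefix.mp h4
                have ht' : t'.length ≤ n := by simp at ht; omega
                simp [repl, unescape_text_scan]
                simpa using ih t' ht'
              · rw [Bool.not_eq_true] at h4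
                by_cases h5 : (['a','m','p',';'] : List Char).isPrefixOf t = true
                · obtain ⟨t', rfl⟩ := List.isPrefixOf_iff_prefix.mp h5
                  have ht' : t'.length ≤ n := by simp at ht; omega
                  simp [repl, unescape_text_scan]
                  simpa using ih t' ht'
                · rw [Bool.not_eq_true] at h5
                  -- no entity starts here: every pass keeps this '&' and moves on
                  have q2 : (['q','u','o','t',';'] : List Char).isPrefixOf
                      (repl "&apos;".toList ['\''] t) = false := by
                    rw [prefix_repl_iff _ _ (by decide) t _ (by decide) (by decide)]; exact h2
                  have q3 : (['l','t',';'] : List Char).isPrefixOf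
                      (repl "&quot;".toList ['"'] (repl "&apos;".toList ['\''] t)) = false := by
                    rw [prefix_repl_iff _ _ (by decide) _ _ (by decide) (by decide),
                        prefix_repl_iff _ _ (by decide) t _ (by decide) (by decide)]; exact h3
                  have q4 : (['g','t',';'] : List Char).isPrefixOf
                      (repl "&lt;".toList ['<'] (repl "&quot;".toList ['"']
                        (repl "&apos;".toList ['\''] t))) = false := by
                    rw [prefix_repl_iff _ _ (by decide) _ _ (by decide) (by decide),
                        prefix_repl_iff _ _ (by decide) _ _ (by decide) (by decide),
                        prefix_repl_iff _ _ (by decide) t _ (by decide) (by decide)]; exact h4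
                  have q5 : (['a','m','p',';'] : List Char).isPrefixOf
                      (repl "&gt;".toList ['>'] (repl "&lt;".toList ['<']
                        (repl "&quot;".toList ['"'] (repl "&apos;".toList ['\''] t)))) = false := by
                    rw [prefix_repl_iff _ _ (by decide) _ _ (by decide) (by decide),
                        prefix_repl_iff _ _ (by decide) _ _ (by decide) (by decide),
                        prefix_repl_iff _ _ (by decide) _ _ (by decide) (by decide),
                        prefix_repl_iff _ _ (by decide) t _ (by decide) (by decide)]; exact h5
                  have e1 := repl_cons_neg (old := "&apos;".toList) ['\'']
                    (c := '&') (s := t) (by simp [h1])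
                  have e2 := repl_cons_neg (old := "&quot;".toList) ['"'] (c := '&')
                    (s := repl "&apos;".toList ['\''] t) (by simpa using q2)
                  have e3 := repl_cons_neg (old := "&lt;".toList) ['<'] (c := '&')
                    (s := repl "&quot;".toList ['"'] (repl "&apos;".toList ['\''] t))
                    (by simpa using q3)
                  have e4 := repl_cons_neg (old := "&gt;".toList) ['>'] (c := '&')
                    (s := repl "&lt;".toList ['<'] (repl "&quot;".toList ['"']
                      (repl "&apos;".toList ['\''] t))) (by simpa using q4)
                  have e5 := repl_cons_neg (old := "&amp;".toList) ['&'] (c := '&')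
                    (s := repl "&gt;".toList ['>'] (repl "&lt;".toList ['<']
                      (repl "&quot;".toList ['"'] (repl "&apos;".toList ['\''] t))))
                    (by simpa using q5)
                  rw [e1, e2, e3, e4, e5, unescape_text_scan]
                  simp [h1, h2, h3, h4, h5]
                  simpa using ih t ht
      · have e1 := repl_cons_ne (old := "&apos;".toList) ['\''] (h := rfl) (hc := hc) (s := t)
        have e2 := repl_cons_ne (old := "&quot;".toList) ['"'] (h := rfl) (hc := hc)
          (s := repl "&apos;".toList ['\''] t)
        have e3 := repl_cons_ne (old := "&lt;".toList) ['<'] (h := rfl) (hc := hc)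
          (s := repl "&quot;".toList ['"'] (repl "&apos;".toList ['\''] t))
        have e4 := repl_cons_ne (old := "&gt;".toList) ['>'] (h := rfl) (hc := hc)
          (s := repl "&lt;".toList ['<'] (repl "&quot;".toList ['"'] (repl "&apos;".toList ['\''] t)))
        have e5 := repl_cons_ne (old := "&amp;".toList) ['&'] (h := rfl) (hc := hc)
          (s := repl "&gt;".toList ['>'] (repl "&lt;".toList ['<'] (repl "&quot;".toList ['"'] (repl "&apos;".toList ['\''] t))))
        rw [e1, e2, e3, e4, e5, unescape_text_scan]
        simp [hc]
        simpa using ih t ht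

-- ===== VERDICT (by name: the statement is the Claim_ definition above) =====
theorem unescape_text_spec : Claim_equal_unescape_text := by
  intro text _
  unfold Spec_unescape_text unescape_text unescape_text_alt
  rw [← String.toList_inj]
  simp only [List.foldl, PySem.Str.replace, String.toList_ofList]
  rw [replace_eq_repl _ _ _ (by decide), replace_eq_repl _ _ _ (by decide),
      replace_eq_repl _ _ _ (by decide), replace_eq_repl _ _ _ (by decide),
      replace_eq_repl _ _ _ (by decide)]
  exact master text.toList
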